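-- pv_equiv track=rewrite | github.com/smilinTux/skwhisper | skwhisper/watcher.py | format_messages_for_summary
-- ===== SOURCE A (Python) =====
-- def format_messages_for_summary(messages: list[dict], max_chars: int = 15000) -> str:
--     """Format extracted messages into a text block for summarization."""
--     lines = []
--     total = 0
--     for msg in messages:
--         role = "Chef" if msg["role"] == "user" else "Lumina"
--         line = f"{role}: {msg['text']}"
--         if total + len(line) > max_chars:
--             lines.append(f"[...{len(messages) - len(lines)} more messages truncated...]")
--             break
--         lines.append(line)
--         total += len(line)
--     return "\n\n".join(lines)
-- ===== SOURCE B (Python) =====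
-- def format_messages_for_summary(messages: list[dict], max_chars: int = 15000) -> str:
--     """Format extracted messages into a text block for summarization."""
--     lines = [f"{'Chef' if m['role'] == 'user' else 'Lumina'}: {m['text']}" for m in messages]
--     prefix = []
--     running = 0
--     for ln in lines:
--         running += len(ln)
--         prefix.append(running)
--     cut = next((i for i, t in enumerate(prefix) if t > max_chars), len(lines))
--     if cut == len(lines):
--         return "\n\n".join(lines)
--     return "\n\n".join(lines[:cut] + [f"[...{len(messages) - cut} more messages truncated...]"])
-- ===== Notes on version B (the rewrite author's own statement) =====
-- stated objective: alternative
-- what changed: B separates the work into three phases - format all lines, build the prefix-sum table of their lengths, locate the first index exceeding max_chars - instead of A's single fused accumulate-and-break loop.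
import Mathlib
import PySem

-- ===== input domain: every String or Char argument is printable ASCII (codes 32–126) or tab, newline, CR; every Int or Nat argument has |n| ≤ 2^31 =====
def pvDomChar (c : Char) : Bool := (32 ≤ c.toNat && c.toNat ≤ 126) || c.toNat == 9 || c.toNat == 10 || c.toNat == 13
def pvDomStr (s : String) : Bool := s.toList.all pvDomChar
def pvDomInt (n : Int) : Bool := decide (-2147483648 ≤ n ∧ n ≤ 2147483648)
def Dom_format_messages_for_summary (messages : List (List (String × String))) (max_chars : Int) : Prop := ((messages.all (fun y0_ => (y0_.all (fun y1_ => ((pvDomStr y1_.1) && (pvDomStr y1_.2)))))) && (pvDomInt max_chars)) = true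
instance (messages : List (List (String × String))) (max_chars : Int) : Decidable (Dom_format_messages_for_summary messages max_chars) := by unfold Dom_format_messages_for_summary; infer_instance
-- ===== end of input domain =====

-- B splits A's fused accumulate-and-break loop into three phases (format all lines, build the
-- prefix-sum table of lengths, locate the first index exceeding max_chars); alternative decomposition, same cost.


-- ===== PORT A =====
-- the for-loop with its break: state (lines, total); msgsLen = len(messages)
def pvLoopA (max_chars msgsLen : Int) : List (List (String × String)) → List String → Int → List String
  | [], lines, _ => lines
  | msg :: rest, lines, total =>
    let role := if (PySem.Dict.get? (PySem.Dict.mk msg) "role").getD "" = "user" then "Chef" else "Lumina"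
    let line := role ++ ": " ++ (PySem.Dict.get? (PySem.Dict.mk msg) "text").getD ""
    if total + PySem.Str.len line > max_chars then
      lines ++ ["[..." ++ PySem.Int.toStr (msgsLen - (lines.length : Int)) ++ " more messages truncated...]"]
    else
      pvLoopA max_chars msgsLen rest (lines ++ [line]) (total + PySem.Str.len line)

def format_messages_for_summary (messages : List (List (String × String))) (max_chars : Int) : String :=
  PySem.Str.join "\n\n" (pvLoopA max_chars (PySem.List.len messages) messages [] 0)

-- ===== PORT B =====
def format_messages_for_summary_alt (messages : List (List (String × String))) (max_chars : Int) : String :=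
  let lines := messages.map (fun m =>
    (if (PySem.Dict.get? (PySem.Dict.mk m) "role").getD "" = "user" then "Chef" else "Lumina")
      ++ ": " ++ (PySem.Dict.get? (PySem.Dict.mk m) "text").getD "")
  let pref := (lines.foldl (fun st ln => (st.1 ++ [st.2 + PySem.Str.len ln], st.2 + PySem.Str.len ln))
                (([] : List Int), (0 : Int))).1
  let cut := (pref.findIdx? (fun t => t > max_chars)).getD lines.length
  if cut = lines.length then PySem.Str.join "\n\n" lines
  else PySem.Str.join "\n\n" (lines.take cut ++
    ["[..." ++ PySem.Int.toStr (PySem.List.len messages - (cut : Int)) ++ " more messages truncated...]"])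

-- ===== PRECONDITION & SPEC =====
-- Pre_ excludes message dicts missing a "role" or "text" key, on which Python raises KeyError; it asks this of
-- EVERY message, so it also excludes lists whose malformed entries lie beyond the truncation point, where A
-- happens to return (an accident of its early break) while B, which formats every line first, raises.
def Pre_format_messages_for_summary (messages : List (List (String × String))) (max_chars : Int) : Prop :=
  ∀ m ∈ messages, (PySem.Dict.get? (PySem.Dict.mk m) "role").isSome = true ∧
                  (PySem.Dict.get? (PySem.Dict.mk m) "text").isSome = true
instance (messages : List (List (String × String))) (max_chars : Int) : Decidable (Pre_format_messages_for_summary messages max_chars) := by unfold Pre_format_messages_for_summary; infer_instance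

def pvWitness_format_messages_for_summary : (List (List (String × String))) × Int :=
  ([[("role", "user"), ("text", "hi")], [("role", "bot"), ("text", "yo")]], 15000)

def Spec_format_messages_for_summary (messages : List (List (String × String))) (max_chars : Int) (out : String) : Prop := out = format_messages_for_summary_alt messages max_chars
instance (messages : List (List (String × String))) (max_chars : Int) (out : String) : Decidable (Spec_format_messages_for_summary messages max_chars out) := by unfold Spec_format_messages_for_summary; infer_instance

-- ===== CLAIM (what is proved, stated in full; the proofs are below) =====
def Claim_equal_format_messages_for_summary : Prop := ∀ (messages : List (List (String × String))) (max_chars : Int), Dom_format_messages_for_summary messages max_chars → Pre_format_messages_for_summary messages max_chars → Spec_format_messages_for_summary messages max_chars (format_messages_for_summary messages max_chars)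

-- ===== LEMMAS AND PROOFS =====

-- proof-side: the formatted line of one message (definitionally the expression both ports use)
def pvFmt (m : List (String × String)) : String :=
  (if (PySem.Dict.get? (PySem.Dict.mk m) "role").getD "" = "user" then "Chef" else "Lumina")
    ++ ": " ++ (PySem.Dict.get? (PySem.Dict.mk m) "text").getD ""

-- proof-side: first index k such that the running total, started at s, exceeds mc after line k
def pvCut (mc : Int) : Int → List String → Option Nat
  | _, [] => none
  | s, l :: ls => if s + PySem.Str.len l > mc then some 0 else (pvCut mc (s + PySem.Str.len l) ls).map (· + 1)

-- proof-side: list of running prefix sums of lengths, started at s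
def pvPref : Int → List String → List Int
  | _, [] => []
  | s, l :: ls => (s + PySem.Str.len l) :: pvPref (s + PySem.Str.len l) ls

theorem pvLoopA_eq (mc L : Int) (rest : List (List (String × String))) :
    ∀ (lines : List String) (total : Int),
    pvLoopA mc L rest lines total =
      match pvCut mc total (rest.map pvFmt) with
      | none => lines ++ rest.map pvFmt
      | some k => lines ++ (rest.map pvFmt).take k ++
          ["[..." ++ PySem.Int.toStr (L - ((lines.length : Int) + (k : Int))) ++ " more messages truncated...]"] := by
  induction rest with
  | nil => intro lines total; simp [pvLoopA, pvCut]
  | cons msg rest ih =>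
    intro lines total
    show (if total + PySem.Str.len (pvFmt msg) > mc then _ else pvLoopA mc L rest (lines ++ [pvFmt msg]) (total + PySem.Str.len (pvFmt msg))) = _
    by_cases h : total + PySem.Str.len (pvFmt msg) > mc
    · simp only [List.map_cons, pvCut, h, if_true]
      simp
    · simp only [List.map_cons, pvCut, h, if_false]
      rw [ih]
      cases hc : pvCut mc (total + PySem.Str.len (pvFmt msg)) (rest.map pvFmt) with
      | none => simp
      | some k =>
        simp only [Option.map_some, List.take_succ_cons, List.length_append, List.length_cons,
          List.length_nil, List.append_assoc, List.cons_append, List.nil_append]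
        have harg : ∀ a b : Int, a = b →
            "[..." ++ PySem.Int.toStr a ++ " more messages truncated...]"
              = "[..." ++ PySem.Int.toStr b ++ " more messages truncated...]" := by
          intro a b hab; rw [hab]
        rw [harg (L - (((lines.length + (0 + 1) : Nat) : Int) + (k : Int)))
              (L - (((lines.length) : Int) + ((k + 1 : Nat) : Int))) (by push_cast; omega)]

theorem pvFoldl_pref (mc : Int) (ls : List String) :
    ∀ (acc : List Int) (s : Int),
    (ls.foldl (fun st ln => (st.1 ++ [st.2 + PySem.Str.len ln], st.2 + PySem.Str.len ln)) (acc, s)).1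
      = acc ++ pvPref s ls := by
  induction ls with
  | nil => intro acc s; simp [pvPref]
  | cons l ls ih =>
    intro acc s
    have h := ih (acc ++ [s + PySem.Str.len l]) (s + PySem.Str.len l)
    simp only [List.foldl_cons]
    exact h.trans (by simp [pvPref])

theorem pvPref_findIdx (mc : Int) (ls : List String) :
    ∀ (s : Int), (pvPref s ls).findIdx? (fun t => t > mc) = pvCut mc s ls := by
  induction ls with
  | nil => intro s; simp [pvPref, pvCut]
  | cons l ls ih =>
    intro s
    show List.findIdx? (fun t => t > mc) ((s + PySem.Str.len l) :: pvPref (s + PySem.Str.len l) ls) =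
      if s + PySem.Str.len l > mc then some 0 else (pvCut mc (s + PySem.Str.len l) ls).map (· + 1)
    rw [List.findIdx?_cons, ih]
    by_cases h : s + PySem.Str.len l > mc
    · rw [if_pos (by simpa using h), if_pos h]
    · rw [if_neg (by simpa using h), if_neg h]

theorem pvCut_lt (mc : Int) (ls : List String) :
    ∀ (s : Int) (k : Nat), pvCut mc s ls = some k → k < ls.length := by
  induction ls with
  | nil => intro s k h; simp [pvCut] at h
  | cons l ls ih =>
    intro s k h
    simp only [pvCut] at h
    split_ifs at h with hgt
    · cases h; simp
    · cases hc : pvCut mc (s + PySem.Str.len l) ls with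
      | none => rw [hc] at h; simp at h
      | some k' =>
        rw [hc] at h
        simp only [Option.map_some, Option.some.injEq] at h
        have := ih _ _ hc
        simp [← h]
        omega

-- ===== VERDICT (by name: the statement is the Claim_ definition above) =====
theorem format_messages_for_summary_spec : Claim_equal_format_messages_for_summary := by
  intro messages max_chars _ _
  show format_messages_for_summary messages max_chars = format_messages_for_summary_alt messages max_chars
  have hB : format_messages_for_summary_alt messages max_chars =
      (if ((((messages.map pvFmt).foldl
              (fun st ln => (st.1 ++ [st.2 + PySem.Str.len ln], st.2 + PySem.Str.len ln))
              (([] : List Int), (0 : Int))).1.findIdx? (fun t => t > max_chars)).getD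
            (messages.map pvFmt).length) = (messages.map pvFmt).length
       then PySem.Str.join "\n\n" (messages.map pvFmt)
       else PySem.Str.join "\n\n" ((messages.map pvFmt).take
            (((((messages.map pvFmt).foldl
              (fun st ln => (st.1 ++ [st.2 + PySem.Str.len ln], st.2 + PySem.Str.len ln))
              (([] : List Int), (0 : Int))).1.findIdx? (fun t => t > max_chars)).getD
            (messages.map pvFmt).length)) ++
            ["[..." ++ PySem.Int.toStr (PySem.List.len messages -
              ((((((messages.map pvFmt).foldl
              (fun st ln => (st.1 ++ [st.2 + PySem.Str.len ln], st.2 + PySem.Str.len ln))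
              (([] : List Int), (0 : Int))).1.findIdx? (fun t => t > max_chars)).getD
            (messages.map pvFmt).length) : Nat) : Int)) ++ " more messages truncated...]"])) := rfl
  rw [hB, pvFoldl_pref max_chars, List.nil_append, pvPref_findIdx]
  unfold format_messages_for_summary
  rw [pvLoopA_eq]
  cases hc : pvCut max_chars 0 (messages.map pvFmt) with
  | none => simp
  | some k =>
    have hk : k < (messages.map pvFmt).length := pvCut_lt _ _ _ _ hc
    simp only [Option.getD_some, List.nil_append]
    rw [if_neg (by omega)]
    congr 3
    simp
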